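-- pv_equiv track=rewrite | github.com/Gezele14/LescoTalk | LescoTalk/interpreter.py | alexico
-- ===== SOURCE A (Python) =====
-- def alexico(lis,cont,lr):
--     if  lis[cont]== 0:
--         return lr
--     elif lis[cont] >0 and lis[cont] <= 30:
--         lr.append(str(lis[cont]))
--         lr.append("letra")
--         cont+=1
--         return alexico(lis, cont, lr)
--     elif lis[cont] > 30 and lis[cont] <= 44:
--         lr.append(str(lis[cont]))
--         lr.append("palabra")
--         cont+=1
--         return alexico(lis, cont, lr)
--     elif lis[cont] > 44 and lis[cont] <= 70:
--         lr.append(str(lis[cont]))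
--         lr.append("frase")
--         cont+=1
--         return alexico(lis, cont, lr)
-- ===== SOURCE B (Python) =====
-- def _label(v):
--     return "letra" if v <= 30 else "palabra" if v <= 44 else "frase"
--
-- def alexico(lis, cont, lr):
--     # Two staged passes: first collect the values from index `cont` up to the first
--     # value outside (0, 70], then (only if the scan stopped at a 0) render all
--     # value/label pairs at once and extend lr.  Like A, raises IndexError if the
--     # scan runs off the list and returns None on a value outside every range
--     # (but lr is only mutated on success; A mutates it before returning None).
--     seg = []
--     while 0 < lis[cont] <= 70:
--         seg.append(lis[cont])
--         cont += 1
--     if lis[cont] != 0: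
--         return None
--     lr.extend(s for v in seg for s in (str(v), _label(v)))
--     return lr
-- ===== Notes on version B (the rewrite author's own statement) =====
-- stated objective: alternative
-- what changed: Replaces the three-branch tail recursion that appends labels step by step with a two-stage pass: collect the in-range values into a segment first, then render all str(v)/label pairs in one flat extend; on failure (non-zero out-of-range value) B returns None without touching lr.
-- outside the precondition, e.g. on alexico([80], 0, []): A returns None, B returns None; on alexico([5], 0, []): A raises IndexError, B raises IndexError
import Mathlib
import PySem

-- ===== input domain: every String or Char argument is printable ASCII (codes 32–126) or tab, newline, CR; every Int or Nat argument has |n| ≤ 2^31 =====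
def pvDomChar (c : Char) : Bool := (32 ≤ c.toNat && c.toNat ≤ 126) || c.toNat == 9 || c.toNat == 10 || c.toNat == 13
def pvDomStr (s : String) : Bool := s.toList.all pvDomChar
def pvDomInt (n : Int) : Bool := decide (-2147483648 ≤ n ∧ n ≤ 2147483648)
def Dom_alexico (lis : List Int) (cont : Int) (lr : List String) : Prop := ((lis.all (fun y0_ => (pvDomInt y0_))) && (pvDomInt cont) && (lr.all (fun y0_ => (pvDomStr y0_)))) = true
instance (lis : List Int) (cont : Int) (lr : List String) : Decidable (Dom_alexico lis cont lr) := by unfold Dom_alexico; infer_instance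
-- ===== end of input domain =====

-- ===== PORT A =====
-- B replaces the step-by-step labelling recursion by two staged passes (collect, then
-- render); equivalence is about the RETURN value — both Pythons mutate lr, but A also
-- mutates it before returning None (outside Pre_), B does not.
-- Literal port of A's recursion; where Python raises IndexError or returns None
-- (both outside Pre_alexico) it returns [].
def alexico (lis : List Int) (cont : Int) (lr : List String) : List String :=
  match h : PySem.List.pyGet? lis cont with
  | none => []
  | some v =>
    if v == 0 then lr
    else if v > 0 && v ≤ 30 then alexico lis (cont + 1) (lr ++ [PySem.Int.toStr v, "letra"])
    else if v > 30 && v ≤ 44 then alexico lis (cont + 1) (lr ++ [PySem.Int.toStr v, "palabra"])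
    else if v > 44 && v ≤ 70 then alexico lis (cont + 1) (lr ++ [PySem.Int.toStr v, "frase"])
    else []
termination_by (lis.length - cont).toNat
decreasing_by
  all_goals
    have : PySem.Raise.InRange lis.length cont := by
      by_contra hc
      rw [← PySem.List.pyGet?_eq_none_iff (xs := lis)] at hc
      simp [hc] at h
    simp [PySem.Raise.InRange] at this
    omega

-- ===== PORT B =====
-- B's label helper (conditional expression).
def pvLabel (v : Int) : String :=
  if v ≤ 30 then "letra" else if v ≤ 44 then "palabra" else "frase"

-- B's first pass: the while-loop collecting the in-range values from index cont on;
-- returns none on IndexError, otherwise the segment together with the stopping value.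
def pvCollect (lis : List Int) (cont : Int) : Option (List Int × Int) :=
  match h : PySem.List.pyGet? lis cont with
  | none => none
  | some v =>
    if 0 < v && v ≤ 70 then
      (pvCollect lis (cont + 1)).map (fun p => (v :: p.1, p.2))
    else some ([], v)
termination_by (lis.length - cont).toNat
decreasing_by
  all_goals
    have : PySem.Raise.InRange lis.length cont := by
      by_contra hc
      rw [← PySem.List.pyGet?_eq_none_iff (xs := lis)] at hc
      simp [hc] at h
    simp [PySem.Raise.InRange] at this
    omega

-- Literal port of B: collect, then (only if the scan stopped at 0) render all pairs in
-- one extend; [] stands for Python's IndexError / None, both outside Pre_alexico.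
def alexico_alt (lis : List Int) (cont : Int) (lr : List String) : List String :=
  match pvCollect lis cont with
  | none => []
  | some (seg, stop) =>
    if stop != 0 then []
    else lr ++ seg.flatMap (fun v => [PySem.Int.toStr v, pvLabel v])

-- ===== PRECONDITION & SPEC =====
-- Pre_alexico: exactly the inputs on which Python A returns a list: scanning indices cont,
-- cont+1, ... (Python negative indexing included via pyGet?), a 0 is reached before the end
-- of the list and every value before it lies in (0, 70].  Outside Pre_ A raises IndexError
-- (the scan runs off the list) or returns None (a value out of every range), not a List String.
-- (A valid scan takes at most 2*len steps, negative start included, hence the range bound.)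
def Pre_alexico (lis : List Int) (cont : Int) (lr : List String) : Prop :=
  ∃ k ∈ List.range (lis.length + lis.length + 1),
    PySem.List.pyGet? lis (cont + k) = some 0 ∧
    ∀ m ∈ List.range k, ∃ v, PySem.List.pyGet? lis (cont + m) = some v ∧ 0 < v ∧ v ≤ 70
instance (lis : List Int) (cont : Int) (lr : List String) : Decidable (Pre_alexico lis cont lr) := by
  unfold Pre_alexico; infer_instance
def pvWitness_alexico : List Int × Int × List String := ([5, 40, 60, 0], 0, ["x"])

def Spec_alexico (lis : List Int) (cont : Int) (lr : List String) (out : List String) : Prop := out = alexico_alt lis cont lr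
instance (lis : List Int) (cont : Int) (lr : List String) (out : List String) : Decidable (Spec_alexico lis cont lr out) := by unfold Spec_alexico; infer_instance

-- ===== CLAIM (what is proved, stated in full; the proofs are below) =====
def Claim_equal_alexico : Prop := ∀ (lis : List Int) (cont : Int) (lr : List String), Dom_alexico lis cont lr → Pre_alexico lis cont lr → Spec_alexico lis cont lr (alexico lis cont lr)

-- ===== LEMMAS AND PROOFS =====

-- Characterisation of pvCollect at an in-range index / out of range.
theorem pvCollect_some (lis : List Int) (cont : Int) (v : Int)
    (h : PySem.List.pyGet? lis cont = some v) :
    pvCollect lis cont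
      = if 0 < v && v ≤ 70 then
          (pvCollect lis (cont + 1)).map (fun p => (v :: p.1, p.2))
        else some ([], v) := by
  rw [pvCollect]
  split
  next heq => simp [h] at heq
  next w heq => rw [h] at heq; injection heq with hw; subst hw; rfl

theorem pvCollect_none (lis : List Int) (cont : Int)
    (h : PySem.List.pyGet? lis cont = none) :
    pvCollect lis cont = none := by
  rw [pvCollect]
  split
  next => rfl
  next w heq => rw [h] at heq; exact absurd heq (by simp)

-- One step of B: when the scanned value is in (0,70], B's collect-then-render result is the
-- same as recursing from cont+1 with the rendered pair already appended.
theorem alt_step (lis : List Int) (cont : Int) (lr : List String) (v : Int)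
    (h : PySem.List.pyGet? lis cont = some v) (hv : 0 < v ∧ v ≤ 70) :
    alexico_alt lis cont lr
      = alexico_alt lis (cont + 1) (lr ++ [PySem.Int.toStr v, pvLabel v]) := by
  unfold alexico_alt
  rw [pvCollect_some lis cont v h, if_pos (by simpa using hv)]
  cases pvCollect lis (cont + 1) with
  | none => rfl
  | some p =>
    cases p with
    | mk seg stop =>
      simp only [Option.map_some]
      by_cases hs : stop = 0 <;> simp [hs]

-- Terminal cases of B.
theorem alt_zero (lis : List Int) (cont : Int) (lr : List String)
    (h : PySem.List.pyGet? lis cont = some 0) :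
    alexico_alt lis cont lr = lr := by
  unfold alexico_alt
  rw [pvCollect_some lis cont 0 h]
  simp

theorem alt_bad (lis : List Int) (cont : Int) (lr : List String) (v : Int)
    (h : PySem.List.pyGet? lis cont = some v) (hv0 : v ≠ 0) (hv : ¬ (0 < v ∧ v ≤ 70)) :
    alexico_alt lis cont lr = [] := by
  unfold alexico_alt
  rw [pvCollect_some lis cont v h, if_neg (by simpa using hv)]
  simp [hv0]

theorem alt_none (lis : List Int) (cont : Int) (lr : List String)
    (h : PySem.List.pyGet? lis cont = none) :
    alexico_alt lis cont lr = [] := by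
  unfold alexico_alt
  rw [pvCollect_none lis cont h]

-- The two ports agree on every input (the staged collect/render of B replays exactly the
-- appends of A's recursion, in the same order).
theorem alexico_eq_alt (lis : List Int) (cont : Int) (lr : List String) :
    alexico lis cont lr = alexico_alt lis cont lr := by
  fun_induction alexico lis cont lr with
  | case1 cont lr h =>
      exact (alt_none lis cont lr h).symm
  | case2 cont lr v h hv =>
      have hv0 : v = 0 := by simpa using hv
      subst hv0
      exact (alt_zero lis cont lr h).symm
  | case3 cont lr v h hv h1 ih =>
      simp only [beq_iff_eq, Bool.and_eq_true, decide_eq_true_eq] at hv h1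
      rw [ih, alt_step lis cont lr v h ⟨by omega, by omega⟩]
      have : pvLabel v = "letra" := by unfold pvLabel; rw [if_pos (by omega)]
      rw [this]
  | case4 cont lr v h hv h1 h2 ih =>
      simp only [beq_iff_eq, Bool.and_eq_true, decide_eq_true_eq] at hv h1 h2
      rw [ih, alt_step lis cont lr v h ⟨by omega, by omega⟩]
      have : pvLabel v = "palabra" := by
        unfold pvLabel; rw [if_neg (by omega), if_pos (by omega)]
      rw [this]
  | case5 cont lr v h hv h1 h2 h3 ih =>
      simp only [beq_iff_eq, Bool.and_eq_true, decide_eq_true_eq] at hv h1 h2 h3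
      rw [ih, alt_step lis cont lr v h ⟨by omega, by omega⟩]
      have : pvLabel v = "frase" := by
        unfold pvLabel; rw [if_neg (by omega), if_neg (by omega)]
      rw [this]
  | case6 cont lr v h hv h1 h2 h3 =>
      simp only [beq_iff_eq, Bool.and_eq_true, decide_eq_true_eq] at hv h1 h2 h3
      exact (alt_bad lis cont lr v h (by omega) (by omega)).symm

-- ===== VERDICT (by name: the statement is the Claim_ definition above) =====
theorem alexico_spec : Claim_equal_alexico := by
  intro lis cont lr _ _
  exact alexico_eq_alt lis cont lr
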